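-- pv_equiv track=rewrite | github.com/kudu-dynamics/ember | src/ember/graph/layout.py | detect_overlap
-- ===== SOURCE A (Python) =====
-- from typing import Any, Dict, List, Optional, Set, Tuple, TypeVar
--
-- Node = Any
--
-- def detect_overlap(node,
--                    cols: Dict[Node, int],
--                    ideal_col: int,
--                    row_nodes: List[Node],
--                    min_col: int) -> Tuple[bool, int]:
--     overlap_detected = False
--     suggested_col = min_col
--
--     # Check for overlap
--     for row_node in sorted(row_nodes, key=lambda n: cols[n]):
--         if row_node is node:
--             continue
--         row_node_col = cols[row_node]
--         if row_node_col - 1 <= ideal_col <= row_node_col + 1: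
--             # Detected collision
--             overlap_detected = True
--         if row_node_col - 1 <= suggested_col <= row_node_col + 1:
--             # Adjust suggestion
--             suggested_col = row_node_col + 2
--         if overlap_detected and suggested_col < row_node_col - 1:
--             # Have a working suggestion
--             break
--
--     if overlap_detected:
--         return True, suggested_col
--     else:
--         return False, ideal_col
-- ===== SOURCE B (Python) =====
-- def detect_overlap(node, cols, ideal_col, row_nodes, min_col):
--     overlap_detected = any(
--         row_node != node and abs(cols[row_node] - ideal_col) <= 1
--         for row_node in row_nodes)
--     if not overlap_detected:
--         return False, ideal_col
--     suggested_col = min_col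
--     for row_node in sorted(row_nodes, key=cols.__getitem__):
--         if row_node == node:
--             continue
--         row_node_col = cols[row_node]
--         if row_node_col - 1 <= suggested_col <= row_node_col + 1:
--             suggested_col = row_node_col + 2
--     return True, suggested_col
-- ===== Notes on version B (the rewrite author's own statement) =====
-- stated objective: simpler
-- what changed: Replaces A's single stateful loop (two flags updated together plus an early break) by two independent passes: a plain membership test over the unsorted row_nodes for overlap, and a breakless fold over the sorted row_nodes for the suggested column (removing the break is safe because once suggested_col sits below col-1 of the current sorted node, no later node can bump it).
-- outside the precondition, e.g. on detect_overlap(1000, {1000: 5}, 5, [1000], 0): A returns (True, 0), B returns (False, 5); on detect_overlap(0, {}, 0, [1], 0): A raises KeyError, B raises KeyError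
import Mathlib
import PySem

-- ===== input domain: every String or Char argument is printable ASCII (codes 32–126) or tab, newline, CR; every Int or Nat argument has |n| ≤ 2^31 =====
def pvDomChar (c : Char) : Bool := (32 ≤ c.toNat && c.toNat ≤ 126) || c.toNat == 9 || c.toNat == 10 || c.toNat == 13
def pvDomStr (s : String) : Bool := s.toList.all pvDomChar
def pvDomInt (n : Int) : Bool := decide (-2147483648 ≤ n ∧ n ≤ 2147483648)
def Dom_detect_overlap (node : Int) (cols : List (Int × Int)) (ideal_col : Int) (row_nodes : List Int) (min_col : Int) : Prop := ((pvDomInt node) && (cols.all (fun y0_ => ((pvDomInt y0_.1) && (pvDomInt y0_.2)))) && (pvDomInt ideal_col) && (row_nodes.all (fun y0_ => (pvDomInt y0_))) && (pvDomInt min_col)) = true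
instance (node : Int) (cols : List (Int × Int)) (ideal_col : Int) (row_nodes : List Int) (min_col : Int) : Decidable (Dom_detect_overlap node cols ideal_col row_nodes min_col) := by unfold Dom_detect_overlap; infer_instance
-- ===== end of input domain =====

-- B replaces A's single stateful loop (overlap flag + suggestion + early break) by two
-- independent passes: a membership test for overlap and a breakless fold for the suggestion
-- (objective: simpler).

-- dict lookup cols[r] (first match; Pre_ guarantees the key is present, default never used)
def pvColOf (cols : List (Int × Int)) (r : Int) : Int :=
  ((cols.find? (fun p => p.1 == r)).map Prod.snd).getD 0

-- ===== PORT A =====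
-- A's for-loop over the sorted row_nodes, carrying (overlap_detected, suggested_col), with the break
def pvLoopA (node : Int) (cols : List (Int × Int)) (ideal_col : Int) :
    List Int → Bool → Int → Bool × Int
  | [], od, sc => (od, sc)
  | r :: rest, od, sc =>
    if r == node then pvLoopA node cols ideal_col rest od sc
    else
      let c := pvColOf cols r
      let od' := if c - 1 ≤ ideal_col ∧ ideal_col ≤ c + 1 then true else od
      let sc' := if c - 1 ≤ sc ∧ sc ≤ c + 1 then c + 2 else sc
      if od' = true ∧ sc' < c - 1 then (od', sc')
      else pvLoopA node cols ideal_col rest od' sc'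

def detect_overlap (node : Int) (cols : List (Int × Int)) (ideal_col : Int) (row_nodes : List Int) (min_col : Int) : Bool × Int :=
  let res := pvLoopA node cols ideal_col
    (PySem.List.sorted row_nodes (fun n => pvColOf cols n) false) false min_col
  if res.1 then (true, res.2) else (false, ideal_col)

-- ===== PORT B =====
-- the body of B's suggestion loop (skip node, bump the suggestion past a conflicting column)
def pvStepB (node : Int) (cols : List (Int × Int)) (sc : Int) (r : Int) : Int :=
  if r == node then sc
  else if pvColOf cols r - 1 ≤ sc ∧ sc ≤ pvColOf cols r + 1 then pvColOf cols r + 2 else sc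

def detect_overlap_alt (node : Int) (cols : List (Int × Int)) (ideal_col : Int) (row_nodes : List Int) (min_col : Int) : Bool × Int :=
  let overlap_detected := row_nodes.any
    (fun r => r != node && decide ((pvColOf cols r - ideal_col).natAbs ≤ 1))
  if overlap_detected = false then (false, ideal_col)
  else
    (true, (PySem.List.sorted row_nodes (fun n => pvColOf cols n) false).foldl
      (pvStepB node cols) min_col)

-- ===== PRECONDITION & SPEC =====
-- Pre_ excludes (i) inputs where some row_node is not a key of cols — Python A raises KeyError
-- there — and (ii) inputs where node itself occurs in row_nodes with a value outside CPython's
-- small-int cache [-5, 256]: there A's `row_node is node` identity test depends on object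
-- identity, not value (the same input tuple yields different results depending on how its ints
-- were constructed), so no value-level port can match it.
def Pre_detect_overlap (node : Int) (cols : List (Int × Int)) (ideal_col : Int) (row_nodes : List Int) (min_col : Int) : Prop :=
  (row_nodes.all (fun r => (cols.find? (fun p => p.1 == r)).isSome) &&
   (!row_nodes.contains node || (decide (-5 ≤ node) && decide (node ≤ 256)))) = true
instance (node : Int) (cols : List (Int × Int)) (ideal_col : Int) (row_nodes : List Int) (min_col : Int) : Decidable (Pre_detect_overlap node cols ideal_col row_nodes min_col) := by unfold Pre_detect_overlap; infer_instance

def pvWitness_detect_overlap : Int × (List (Int × Int)) × Int × List Int × Int :=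
  (0, [(1, 3), (2, 0)], 0, [1, 2], 0)

def Spec_detect_overlap (node : Int) (cols : List (Int × Int)) (ideal_col : Int) (row_nodes : List Int) (min_col : Int) (out : Bool × Int) : Prop := out = detect_overlap_alt node cols ideal_col row_nodes min_col
instance (node : Int) (cols : List (Int × Int)) (ideal_col : Int) (row_nodes : List Int) (min_col : Int) (out : Bool × Int) : Decidable (Spec_detect_overlap node cols ideal_col row_nodes min_col out) := by unfold Spec_detect_overlap; infer_instance

-- ===== CLAIM (what is proved, stated in full; the proofs are below) =====
def Claim_equal_detect_overlap : Prop := ∀ (node : Int) (cols : List (Int × Int)) (ideal_col : Int) (row_nodes : List Int) (min_col : Int), Dom_detect_overlap node cols ideal_col row_nodes min_col → Pre_detect_overlap node cols ideal_col row_nodes min_col → Spec_detect_overlap node cols ideal_col row_nodes min_col (detect_overlap node cols ideal_col row_nodes min_col)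

-- ===== LEMMAS AND PROOFS =====

-- once the accumulator is strictly below every key - 1, B's fold is the identity
theorem pvFold_stable (node : Int) (cols : List (Int × Int)) :
    ∀ (l : List Int) (sc : Int), (∀ x ∈ l, sc < pvColOf cols x - 1) →
      l.foldl (pvStepB node cols) sc = sc := by
  intro l
  induction l with
  | nil => intro sc _; rfl
  | cons x t ih =>
    intro sc h
    have hx := h x (by simp)
    have hstep : pvStepB node cols sc x = sc := by
      unfold pvStepB
      split_ifs with h1 h2
      · rfl
      · omega
      · rfl
    simp only [List.foldl_cons, hstep]
    exact ih sc (fun y hy => h y (by simp [hy]))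

-- A's loop, on a key-sorted list, equals (old flag OR overlap-exists, breakless fold)
theorem pvLoopA_eq (node : Int) (cols : List (Int × Int)) (ideal_col : Int) :
    ∀ (l : List Int), l.Pairwise (fun a b => pvColOf cols a ≤ pvColOf cols b) →
      ∀ (od : Bool) (sc : Int),
      pvLoopA node cols ideal_col l od sc =
        (od || l.any (fun r => r != node &&
            decide (pvColOf cols r - 1 ≤ ideal_col ∧ ideal_col ≤ pvColOf cols r + 1)),
         l.foldl (pvStepB node cols) sc) := by
  intro l
  induction l with
  | nil => intro _ od sc; simp [pvLoopA]
  | cons r t ih =>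
    intro hp od sc
    rw [List.pairwise_cons] at hp
    obtain ⟨hhead, htail⟩ := hp
    by_cases hr : r = node
    · subst hr
      simp only [pvLoopA, beq_self_eq_true, if_true]
      rw [ih htail od sc]
      simp [pvStepB]
    · have hrb : (r == node) = false := by simp [hr]
      have hanyr : (r != node) = true := by simp [bne, hrb]
      have hfold : List.foldl (pvStepB node cols) sc (r :: t) =
          List.foldl (pvStepB node cols)
            (if pvColOf cols r - 1 ≤ sc ∧ sc ≤ pvColOf cols r + 1 then pvColOf cols r + 2 else sc) t := by
        simp only [List.foldl_cons]
        congr 1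
        simp [pvStepB, hrb]
      have hany : ((r :: t).any (fun r => r != node &&
            decide (pvColOf cols r - 1 ≤ ideal_col ∧ ideal_col ≤ pvColOf cols r + 1))) =
          (decide (pvColOf cols r - 1 ≤ ideal_col ∧ ideal_col ≤ pvColOf cols r + 1) ||
           t.any (fun r => r != node &&
            decide (pvColOf cols r - 1 ≤ ideal_col ∧ ideal_col ≤ pvColOf cols r + 1))) := by
        simp [List.any_cons, hanyr]
      simp only [pvLoopA, hrb, Bool.false_eq_true, if_false]
      rw [hany, hfold]
      by_cases hI : pvColOf cols r - 1 ≤ ideal_col ∧ ideal_col ≤ pvColOf cols r + 1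
      · simp only [if_pos hI, decide_eq_true hI, Bool.or_true, Bool.true_or]
        by_cases hS : pvColOf cols r - 1 ≤ sc ∧ sc ≤ pvColOf cols r + 1
        · simp only [if_pos hS]
          rw [if_neg (by simp only [true_and]; omega : ¬(True ∧ pvColOf cols r + 2 < pvColOf cols r - 1))]
          rw [ih htail true (pvColOf cols r + 2)]
          simp
        · simp only [if_neg hS]
          by_cases hb : sc < pvColOf cols r - 1
          · rw [if_pos ⟨trivial, hb⟩]
            have hstab : List.foldl (pvStepB node cols) sc t = sc := by
              apply pvFold_stable
              intro x hx
              have := hhead x hx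
              omega
            rw [hstab]
          · rw [if_neg (by simp [hb])]
            rw [ih htail true sc]
            simp
      · simp only [if_neg hI, decide_eq_false hI, Bool.false_or]
        by_cases hS : pvColOf cols r - 1 ≤ sc ∧ sc ≤ pvColOf cols r + 1
        · simp only [if_pos hS]
          rw [if_neg (by omega : ¬(od = true ∧ pvColOf cols r + 2 < pvColOf cols r - 1))]
          exact ih htail od (pvColOf cols r + 2)
        · simp only [if_neg hS]
          by_cases hbrk : od = true ∧ sc < pvColOf cols r - 1
          · rw [if_pos hbrk]
            obtain ⟨hod, hb⟩ := hbrk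
            have hstab : List.foldl (pvStepB node cols) sc t = sc := by
              apply pvFold_stable
              intro x hx
              have := hhead x hx
              omega
            rw [hstab, hod]
            simp
          · rw [if_neg hbrk]
            exact ih htail od sc

-- the two overlap tests agree (sorted vs unsorted list; interval vs abs form)
theorem pvAny_eq (node : Int) (cols : List (Int × Int)) (ideal_col : Int) (row_nodes : List Int) :
    (PySem.List.sorted row_nodes (fun n => pvColOf cols n) false).any (fun r => r != node &&
        decide (pvColOf cols r - 1 ≤ ideal_col ∧ ideal_col ≤ pvColOf cols r + 1)) =
    row_nodes.any (fun r => r != node && decide ((pvColOf cols r - ideal_col).natAbs ≤ 1)) := by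
  rw [Bool.eq_iff_iff]
  simp only [List.any_eq_true, PySem.List.mem_sorted, Bool.and_eq_true, bne_iff_ne,
    decide_eq_true_eq]
  constructor
  · rintro ⟨r, hr, hne, h⟩; exact ⟨r, hr, hne, by omega⟩
  · rintro ⟨r, hr, hne, h⟩; exact ⟨r, hr, hne, by omega⟩

-- ===== VERDICT (by name: the statement is the Claim_ definition above) =====
theorem detect_overlap_spec : Claim_equal_detect_overlap := by
  intro node cols ideal_col row_nodes min_col _ _
  unfold Spec_detect_overlap detect_overlap detect_overlap_alt
  rw [pvLoopA_eq node cols ideal_col _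
      (PySem.List.sorted_pairwise row_nodes (fun n => pvColOf cols n)) false min_col]
  rw [pvAny_eq]
  cases h : row_nodes.any (fun r => r != node && decide ((pvColOf cols r - ideal_col).natAbs ≤ 1)) <;>
    simp [h]
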